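-- pv_equiv track=rewrite | github.com/puralmajor/python_algorithm | 프로그래머스/[level2] 무인도 여행.py | solution
-- ===== SOURCE A (Python) =====
-- from collections import deque
--
-- def solution(maps):
--     answer = []
--     r, c = len(maps), len(maps[0])
--     maps = list(map(list, maps))
--     visit = [[0] * c for _ in range(r)]
--     dx, dy = [-1, 1, 0, 0], [0, 0, -1, 1]
--
--     def bfs(x, y):
--         if visit[x][y] or maps[x][y] == 'X':
--             return
--
--         q = deque()
--         q.append((x, y))
--         visit[x][y] = 1
--         val = 0
--         while q:
--             cx, cy = q.popleft()
--             val += int(maps[cx][cy])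
--
--             for i in range(4):
--                 nx, ny = cx+dx[i], cy+dy[i]
--                 if 0 <= nx < r and 0 <= ny < c and not visit[nx][ny] and maps[nx][ny] != 'X':
--                     q.append((nx, ny))
--                     visit[nx][ny] = 1
--
--         return val
--
--     for i in range(r):
--         for j in range(c):
--             if maps[i][j] != 'X':
--                 life = bfs(i, j)
--                 if life:
--                     answer.append(life)
--
--     if answer:
--         answer.sort()
--         return answer
--     else:
--         return [-1]
-- ===== SOURCE B (Python) =====
-- def solution(maps):
--     r, c = len(maps), len(maps[0])
--
--     # union-find over coordinate tuples: one key per non-'X' cell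
--     parent = {}
--     for i in range(r):
--         for j in range(c):
--             if maps[i][j] != 'X':
--                 parent[(i, j)] = (i, j)
--
--     def find(cell):
--         while parent[cell] != cell:
--             cell = parent[cell]
--         return cell
--
--     # union each cell with its right and down neighbours; point the
--     # lexicographically larger root at the smaller one
--     for i in range(r):
--         for j in range(c):
--             if (i, j) in parent:
--                 for nb in ((i + 1, j), (i, j + 1)):
--                     if nb in parent:
--                         ra, rb = find((i, j)), find(nb)
--                         if ra != rb:
--                             parent[max(ra, rb)] = min(ra, rb)
--
--     # accumulate each cell's value into its root's bucket
--     sums = {}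
--     for i in range(r):
--         for j in range(c):
--             if (i, j) in parent:
--                 root = find((i, j))
--                 sums[root] = sums.get(root, 0) + int(maps[i][j])
--
--     totals = sorted(v for v in sums.values() if v)
--     return totals if totals else [-1]
-- ===== Notes on version B (the rewrite author's own statement) =====
-- stated objective: alternative
-- what changed: Replaces the per-cell BFS flood fill (deque + visit matrix) by a disjoint-set union-find: each non-'X' cell is a node, right/down neighbours are unioned (larger root pointed at the smaller), and a single pass then accumulates each cell's value into its root's bucket; the nonzero bucket totals are sorted, [] falling back to [-1] as in A.
import Mathlib
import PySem

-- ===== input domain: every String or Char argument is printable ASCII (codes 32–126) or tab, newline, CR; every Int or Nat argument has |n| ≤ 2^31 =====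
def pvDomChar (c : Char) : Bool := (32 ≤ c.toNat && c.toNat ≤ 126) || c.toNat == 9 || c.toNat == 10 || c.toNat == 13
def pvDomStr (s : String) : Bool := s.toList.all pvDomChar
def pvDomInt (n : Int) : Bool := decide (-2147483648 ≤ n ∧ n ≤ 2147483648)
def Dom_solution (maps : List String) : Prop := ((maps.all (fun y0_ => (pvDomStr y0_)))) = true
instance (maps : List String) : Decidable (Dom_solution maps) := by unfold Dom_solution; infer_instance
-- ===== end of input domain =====

-- B is an ALTERNATIVE exact re-implementation: instead of A's per-cell BFS flood fill
-- (deque + visit matrix, appending non-zero sums as found), B builds a disjoint-set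
-- union-find over the non-'X' cells (unioning right/down neighbours, larger root pointed
-- at the lexicographically smaller one) and accumulates each cell's value into its
-- root's bucket; the non-zero bucket totals are sorted, with the same [-1] fallback.

-- ===== PORT A =====
-- shared grid primitives: maps[x][y] and int(maps[x][y]) (single digit char)
def pvCharAt (maps : List String) (x y : Int) : Option Char :=
  match PySem.List.pyGet? maps x with
  | none => none
  | some row => PySem.Str.pyGet? row y

def pvVal (maps : List String) (x y : Int) : Int :=
  match pvCharAt maps x y with
  | some ch => if ch.isDigit then (ch.toNat : Int) - 48 else 0  -- int(ch); non-digit raises in Python (outside Pre_)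
  | none => 0                                                    -- IndexError in Python (outside Pre_)

-- dx, dy = [-1,1,0,0], [0,0,-1,1]
def solDirsX : List Int := [-1, 1, 0, 0]
def solDirsY : List Int := [0, 0, -1, 1]

-- body of A's `for i in range(4)` push loop; the visit matrix is modelled as the list of
-- coordinates (x,y) with visit[x][y] == 1 (membership = flag set; append = setting the flag)
def solPush (maps : List String) (r c : Int) (cx cy : Int)
    (st : List (Int × Int) × List (Int × Int)) (i : Int) : List (Int × Int) × List (Int × Int) :=
  let nx := cx + (PySem.List.pyGet? solDirsX i).getD 0   -- dx[i], always in range for i ∈ range(4)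
  let ny := cy + (PySem.List.pyGet? solDirsY i).getD 0
  if 0 ≤ nx ∧ nx < r ∧ 0 ≤ ny ∧ ny < c ∧ (nx, ny) ∉ st.1 ∧ pvCharAt maps nx ny ≠ some 'X' then
    (st.1 ++ [(nx, ny)], st.2 ++ [(nx, ny)])
  else st

-- A's `while q:` BFS loop: pop from the FRONT of the deque; fuel only makes it total
def solLoop (maps : List String) (r c : Int) :
    Nat → List (Int × Int) → List (Int × Int) → Int → List (Int × Int) × Int
  | 0, V, _, s => (V, s)
  | _ + 1, V, [], s => (V, s)
  | f + 1, V, (cx, cy) :: qt, s =>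
    let s1 := s + pvVal maps cx cy
    let st := (PySem.List.pyRange 0 4 1).foldl (solPush maps r c cx cy) (V, qt)
    solLoop maps r c f st.1 st.2 s1

-- A's bfs(x, y): returns None if visited or 'X', else the component sum
def solBfs (maps : List String) (r c : Int) (V : List (Int × Int)) (x y : Int) :
    List (Int × Int) × Option Int :=
  if (x, y) ∈ V ∨ pvCharAt maps x y = some 'X' then (V, none)
  else
    let res := solLoop maps r c (r.toNat * c.toNat + 1) (V ++ [(x, y)]) [(x, y)] 0
    (res.1, some res.2)

-- body of A's outer double loop: call bfs, append `life` if truthy (some non-zero value)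
def solCellA (maps : List String) (r c : Int) (st : List Int × List (Int × Int)) (i j : Int) :
    List Int × List (Int × Int) :=
  if pvCharAt maps i j ≠ some 'X' then
    let res := solBfs maps r c st.2 i j
    match res.2 with
    | some v => if v ≠ 0 then (st.1 ++ [v], res.1) else (st.1, res.1)
    | none => (st.1, res.1)
  else st

def solution (maps : List String) : List Int :=
  match PySem.List.pyGet? maps 0 with
  | none => [-1]   -- empty input list: Python raises IndexError at maps[0] (excluded by Pre_)
  | some row0 =>
    let r : Int := maps.length
    let c : Int := PySem.Str.len row0
    let fin := (PySem.List.pyRange 0 r 1).foldl (fun st i =>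
      (PySem.List.pyRange 0 c 1).foldl (fun st j => solCellA maps r c st i j) st) ([], [])
    if fin.1 ≠ [] then PySem.List.sorted fin.1 (fun t => t) false else [-1]

-- ===== PORT B =====
-- Python tuple comparison a < b on (int, int) pairs
def pvLtP (a b : Int × Int) : Bool := a.1 < b.1 || (a.1 == b.1 && a.2 < b.2)

def altMax (a b : Int × Int) : Int × Int := if pvLtP a b then b else a   -- max(a, b)
def altMin (a b : Int × Int) : Int × Int := if pvLtP a b then a else b   -- min(a, b)

-- find: `while parent[cell] != cell: cell = parent[cell]`; fuel only makes it total
-- (getD z z: parent[cell] is only evaluated on keys; a missing key is a KeyError outside Pre_)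
def altFind (p : PySem.Dict (Int × Int) (Int × Int)) : Nat → (Int × Int) → (Int × Int)
  | 0, z => z
  | f + 1, z =>
    let w := p.getD z z
    if w = z then z else altFind p f w

-- body of B's inner `for nb in ((i+1, j), (i, j+1)):` union loop
def altUnionNb (F : Nat) (p : PySem.Dict (Int × Int) (Int × Int)) (z nb : Int × Int) :
    PySem.Dict (Int × Int) (Int × Int) :=
  if (p.get? nb).isSome then
    let ra := altFind p F z
    let rb := altFind p F nb
    if ra ≠ rb then p.insert (altMax ra rb) (altMin ra rb) else p
  else p

-- body of B's union phase for one cell: `if (i, j) in parent: for nb in …`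
def altUnionCell (F : Nat) (p : PySem.Dict (Int × Int) (Int × Int)) (z : Int × Int) :
    PySem.Dict (Int × Int) (Int × Int) :=
  if (p.get? z).isSome then
    [(z.1 + 1, z.2), (z.1, z.2 + 1)].foldl (fun p nb => altUnionNb F p z nb) p
  else p

def solution_alt (maps : List String) : List Int :=
  match PySem.List.pyGet? maps 0 with
  | none => [-1]   -- empty input list: Python raises IndexError at maps[0] (excluded by Pre_)
  | some row0 =>
    let r : Int := maps.length
    let c : Int := PySem.Str.len row0
    let F : Nat := r.toNat * c.toNat + 1
    -- parent = {(i, j): (i, j) for each non-'X' cell}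
    let p0 := (PySem.List.pyRange 0 r 1).foldl (fun d i =>
      (PySem.List.pyRange 0 c 1).foldl (fun d j =>
        if pvCharAt maps i j ≠ some 'X' then d.insert (i, j) (i, j) else d) d)
      (PySem.Dict.empty : PySem.Dict (Int × Int) (Int × Int))
    -- union each cell with its right and down neighbours
    let p1 := (PySem.List.pyRange 0 r 1).foldl (fun p i =>
      (PySem.List.pyRange 0 c 1).foldl (fun p j => altUnionCell F p (i, j)) p) p0
    -- sums[root] = sums.get(root, 0) + int(maps[i][j])
    let s := (PySem.List.pyRange 0 r 1).foldl (fun s i =>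
      (PySem.List.pyRange 0 c 1).foldl (fun s j =>
        if (p1.get? (i, j)).isSome then
          s.insert (altFind p1 F (i, j)) (s.getD (altFind p1 F (i, j)) 0 + pvVal maps i j)
        else s) s) (PySem.Dict.empty : PySem.Dict (Int × Int) Int)
    let totals := PySem.List.sorted (s.values.filter (fun v => v ≠ 0)) (fun t => t) false
    if totals ≠ [] then totals else [-1]

-- ===== PRECONDITION & SPEC =====
-- Pre_ excludes exactly the inputs where A raises: an empty input list (IndexError at maps[0]),
-- a row shorter than the first row (IndexError at maps[i][j]), or a cell among the first
-- len(maps[0]) columns that is neither 'X' nor a digit (ValueError at int(maps[x][y])).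
def Pre_solution (maps : List String) : Prop :=
  maps ≠ [] ∧ (maps.all (fun row =>
    decide (PySem.Str.len (maps.headD "") ≤ PySem.Str.len row) &&
    (row.toList.take (PySem.Str.len (maps.headD "")).toNat).all
      (fun ch => ch == 'X' || ch.isDigit))) = true

instance (maps : List String) : Decidable (Pre_solution maps) := by unfold Pre_solution; infer_instance

def pvWitness_solution : List String := ["12", "3X"]

def Spec_solution (maps : List String) (out : List Int) : Prop := out = solution_alt maps
instance (maps : List String) (out : List Int) : Decidable (Spec_solution maps out) := by unfold Spec_solution; infer_instance

-- ===== CLAIM (what is proved, stated in full; the proofs are below) =====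
def Claim_equal_solution : Prop := ∀ (maps : List String), Dom_solution maps → Pre_solution maps → Spec_solution maps (solution maps)

-- ===== LEMMAS AND PROOFS =====

-- cell order (row-major = lexicographic) --------------------------------------
def pvLt (a b : Int × Int) : Prop := a.1 < b.1 ∨ (a.1 = b.1 ∧ a.2 < b.2)

lemma pvLtP_iff (a b : Int × Int) : pvLtP a b = true ↔ pvLt a b := by
  simp [pvLtP, pvLt]

lemma pvLt_irrefl (a : Int × Int) : ¬ pvLt a a := by unfold pvLt; omega

lemma pvLt_trans {a b c : Int × Int} : pvLt a b → pvLt b c → pvLt a c := by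
  unfold pvLt; omega

lemma pvLt_total {a b : Int × Int} (h : a ≠ b) : pvLt a b ∨ pvLt b a := by
  unfold pvLt
  by_cases h1 : a.1 = b.1
  · have h2 : a.2 ≠ b.2 := fun h2 => h (Prod.ext h1 h2)
    omega
  · omega

lemma pvLt_asymm {a b : Int × Int} (h : pvLt a b) : ¬ pvLt b a := by
  unfold pvLt at *; omega

lemma altMax_min_spec (a b : Int × Int) (h : a ≠ b) :
    (altMax a b = b ∧ altMin a b = a ∧ pvLt a b) ∨ (altMax a b = a ∧ altMin a b = b ∧ pvLt b a) := by
  by_cases hlt : pvLtP a b = true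
  · left; exact ⟨by simp [altMax, hlt], by simp [altMin, hlt], (pvLtP_iff a b).mp hlt⟩
  · right
    have hba : pvLt b a := by
      rcases pvLt_total h with h1 | h1
      · exact absurd ((pvLtP_iff a b).mpr h1) hlt
      · exact h1
    have hF : pvLtP a b = false := by simp [hlt]
    exact ⟨by simp [altMax, hF], by simp [altMin, hF], hba⟩

-- the row-major enumeration of the grid ---------------------------------------
def pvCells (r c : Int) : List (Int × Int) :=
  (PySem.List.pyRange 0 r 1).flatMap (fun i => (PySem.List.pyRange 0 c 1).map (fun j => (i, j)))

lemma mem_pvCells {r c : Int} {z : Int × Int} :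
    z ∈ pvCells r c ↔ 0 ≤ z.1 ∧ z.1 < r ∧ 0 ≤ z.2 ∧ z.2 < c := by
  obtain ⟨x, y⟩ := z
  simp only [pvCells, List.mem_flatMap, List.mem_map, PySem.List.mem_pyRange_one, Prod.mk.injEq]
  constructor
  · rintro ⟨i, ⟨h1, h2⟩, j, ⟨h3, h4⟩, rfl, rfl⟩; exact ⟨h1, h2, h3, h4⟩
  · rintro ⟨h1, h2, h3, h4⟩; exact ⟨x, ⟨h1, h2⟩, y, ⟨h3, h4⟩, rfl, rfl⟩

lemma pairwise_pvCells (r c : Int) : (pvCells r c).Pairwise pvLt := by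
  unfold pvCells
  rw [List.flatMap_def, List.pairwise_flatten]
  constructor
  · intro l hl
    simp only [List.mem_map] at hl
    obtain ⟨i, _, rfl⟩ := hl
    rw [List.pairwise_map]
    exact (PySem.List.pairwise_lt_pyRange_one 0 c).imp (fun h => Or.inr ⟨rfl, h⟩)
  · rw [List.pairwise_map]
    refine (PySem.List.pairwise_lt_pyRange_one 0 r).imp ?_
    intro i1 i2 h x hx y hy
    simp only [List.mem_map] at hx hy
    obtain ⟨j1, _, rfl⟩ := hx
    obtain ⟨j2, _, rfl⟩ := hy
    exact Or.inl h

lemma nodup_pvCells (r c : Int) : (pvCells r c).Nodup :=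
  (pairwise_pvCells r c).imp (fun h => by
    intro he; subst he; exact pvLt_irrefl _ h)

lemma foldl_pvCells {σ : Type} (r c : Int) (f : σ → Int × Int → σ) (init : σ) :
    (PySem.List.pyRange 0 r 1).foldl (fun s i =>
      (PySem.List.pyRange 0 c 1).foldl (fun s j => f s (i, j)) s) init
    = (pvCells r c).foldl f init := by
  unfold pvCells
  rw [List.flatMap_def]
  induction (PySem.List.pyRange 0 r 1) generalizing init with
  | nil => rfl
  | cons a L ih =>
    simp only [List.map_cons, List.flatten_cons, List.foldl_cons, List.foldl_append]
    rw [ih, List.foldl_map]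

lemma prefix_facts {r c : Int} {P Q : List (Int × Int)} {z : Int × Int}
    (h : P ++ z :: Q = pvCells r c) :
    (∀ w ∈ P, pvLt w z) ∧ (∀ w, w ∈ pvCells r c → pvLt w z → w ∈ P) ∧ z ∉ P ∧ P.Nodup := by
  have hpw : (P ++ z :: Q).Pairwise pvLt := h ▸ pairwise_pvCells r c
  rw [List.pairwise_append] at hpw
  obtain ⟨hP, hzQ, hcross⟩ := hpw
  have h1 : ∀ w ∈ P, pvLt w z := fun w hw => hcross w hw z List.mem_cons_self
  refine ⟨h1, ?_, ?_, hP.imp (fun h => by intro he; subst he; exact pvLt_irrefl _ h)⟩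
  · intro w hw hlt
    rw [← h] at hw
    rcases List.mem_append.mp hw with hw | hw
    · exact hw
    · rcases List.mem_cons.mp hw with rfl | hw
      · exact absurd hlt (pvLt_irrefl _)
      · exact absurd hlt (pvLt_asymm ((List.pairwise_cons.mp hzQ).1 w hw))
  · intro hzP
    exact pvLt_irrefl z (h1 z hzP)

-- goodness, neighbours, adjacency ---------------------------------------------
def pvNbrs (x y : Int) : List (Int × Int) := [(x - 1, y), (x + 1, y), (x, y - 1), (x, y + 1)]

def pvGood (maps : List String) (r c : Int) (z : Int × Int) : Prop :=
  0 ≤ z.1 ∧ z.1 < r ∧ 0 ≤ z.2 ∧ z.2 < c ∧ pvCharAt maps z.1 z.2 ≠ some 'X'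

lemma pvGood_mem_cells {maps : List String} {r c : Int} {z : Int × Int}
    (h : pvGood maps r c z) : z ∈ pvCells r c :=
  mem_pvCells.mpr ⟨h.1, h.2.1, h.2.2.1, h.2.2.2.1⟩

lemma pvNbrs_symm {z w : Int × Int} : w ∈ pvNbrs z.1 z.2 ↔ z ∈ pvNbrs w.1 w.2 := by
  obtain ⟨a, b⟩ := z; obtain ⟨x, y⟩ := w
  simp only [pvNbrs, List.mem_cons, Prod.mk.injEq, List.not_mem_nil, or_false]
  omega

def pvAdj (maps : List String) (r c : Int) (z w : Int × Int) : Prop :=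
  pvGood maps r c z ∧ pvGood maps r c w ∧ w ∈ pvNbrs z.1 z.2

lemma pvAdj_symm {maps : List String} {r c : Int} : Symmetric (pvAdj maps r c) := by
  intro z w ⟨h1, h2, h3⟩
  exact ⟨h2, h1, pvNbrs_symm.mp h3⟩

def pvConn (maps : List String) (r c : Int) (z w : Int × Int) : Prop :=
  pvGood maps r c z ∧ Relation.ReflTransGen (pvAdj maps r c) z w

lemma pvConn_good_right {maps : List String} {r c : Int} {z w : Int × Int}
    (h : pvConn maps r c z w) : pvGood maps r c w := by
  obtain ⟨hz, h⟩ := h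
  induction h with
  | refl => exact hz
  | tail _ ha _ => exact ha.2.1

lemma pvConn_refl {maps : List String} {r c : Int} {z : Int × Int} (h : pvGood maps r c z) :
    pvConn maps r c z z := ⟨h, Relation.ReflTransGen.refl⟩

lemma pvConn_trans {maps : List String} {r c : Int} {a b c' : Int × Int}
    (h1 : pvConn maps r c a b) (h2 : pvConn maps r c b c') : pvConn maps r c a c' :=
  ⟨h1.1, h1.2.trans h2.2⟩

lemma pvConn_symm {maps : List String} {r c : Int} {a b : Int × Int}
    (h : pvConn maps r c a b) : pvConn maps r c b a :=
  ⟨pvConn_good_right h, (Relation.ReflTransGen.symmetric pvAdj_symm) h.2⟩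

-- the relation generated by a list of (undirected) edges -----------------------
def pvEAdj (maps : List String) (r c : Int) (E : List ((Int × Int) × (Int × Int)))
    (z w : Int × Int) : Prop :=
  pvGood maps r c z ∧ pvGood maps r c w ∧ ((z, w) ∈ E ∨ (w, z) ∈ E)

def pvEConn (maps : List String) (r c : Int) (E : List ((Int × Int) × (Int × Int)))
    (z w : Int × Int) : Prop :=
  pvGood maps r c z ∧ Relation.ReflTransGen (pvEAdj maps r c E) z w

lemma pvEAdj_symm {maps : List String} {r c : Int} {E : List ((Int × Int) × (Int × Int))} :
    Symmetric (pvEAdj maps r c E) := by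
  intro z w ⟨h1, h2, h3⟩
  exact ⟨h2, h1, h3.symm⟩

lemma pvEConn_good_right {maps : List String} {r c : Int} {E : List ((Int × Int) × (Int × Int))}
    {z w : Int × Int} (h : pvEConn maps r c E z w) : pvGood maps r c w := by
  obtain ⟨hz, h⟩ := h
  induction h with
  | refl => exact hz
  | tail _ ha _ => exact ha.2.1

lemma pvEConn_refl {maps : List String} {r c : Int} {E : List ((Int × Int) × (Int × Int))}
    {z : Int × Int} (h : pvGood maps r c z) : pvEConn maps r c E z z :=
  ⟨h, Relation.ReflTransGen.refl⟩

lemma pvEConn_trans {maps : List String} {r c : Int} {E : List ((Int × Int) × (Int × Int))}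
    {a b c' : Int × Int} (h1 : pvEConn maps r c E a b) (h2 : pvEConn maps r c E b c') :
    pvEConn maps r c E a c' := ⟨h1.1, h1.2.trans h2.2⟩

lemma pvEConn_symm {maps : List String} {r c : Int} {E : List ((Int × Int) × (Int × Int))}
    {a b : Int × Int} (h : pvEConn maps r c E a b) : pvEConn maps r c E b a :=
  ⟨pvEConn_good_right h, (Relation.ReflTransGen.symmetric pvEAdj_symm) h.2⟩

lemma pvEConn_nil {maps : List String} {r c : Int} {z w : Int × Int} :
    pvEConn maps r c [] z w ↔ pvGood maps r c z ∧ w = z := by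
  constructor
  · rintro ⟨hz, h⟩
    refine ⟨hz, ?_⟩
    induction h with
    | refl => rfl
    | tail _ ha _ => simp [pvEAdj] at ha
  · rintro ⟨hz, rfl⟩
    exact pvEConn_refl hz

lemma pvEConn_mono {maps : List String} {r c : Int} {E E' : List ((Int × Int) × (Int × Int))}
    (hsub : ∀ e ∈ E, e ∈ E') {z w : Int × Int} (h : pvEConn maps r c E z w) :
    pvEConn maps r c E' z w := by
  refine ⟨h.1, h.2.mono ?_⟩
  rintro a b ⟨h1, h2, h3 | h3⟩
  · exact ⟨h1, h2, Or.inl (hsub _ h3)⟩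
  · exact ⟨h1, h2, Or.inr (hsub _ h3)⟩

lemma pvEConn_append_irrel {maps : List String} {r c : Int} {E : List ((Int × Int) × (Int × Int))}
    {e : (Int × Int) × (Int × Int)} (he : ¬ (pvGood maps r c e.1 ∧ pvGood maps r c e.2))
    {z w : Int × Int} : pvEConn maps r c (E ++ [e]) z w ↔ pvEConn maps r c E z w := by
  constructor
  · rintro ⟨hz, h⟩
    refine ⟨hz, h.mono ?_⟩
    rintro a b ⟨h1, h2, h3 | h3⟩ <;> rcases List.mem_append.mp h3 with h3 | h3
    · exact ⟨h1, h2, Or.inl h3⟩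
    · obtain rfl : (a, b) = e := List.mem_singleton.mp h3
      exact absurd ⟨h1, h2⟩ he
    · exact ⟨h1, h2, Or.inr h3⟩
    · obtain rfl : (b, a) = e := List.mem_singleton.mp h3
      exact absurd ⟨h2, h1⟩ he
  · exact pvEConn_mono (fun e' he' => List.mem_append_left _ he')

lemma pvEConn_append_edge {maps : List String} {r c : Int} {E : List ((Int × Int) × (Int × Int))}
    {a b : Int × Int} (ha : pvGood maps r c a) (hb : pvGood maps r c b) {z w : Int × Int} :
    pvEConn maps r c (E ++ [(a, b)]) z w ↔
      pvEConn maps r c E z w ∨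
      (pvEConn maps r c E z a ∧ pvEConn maps r c E b w) ∨
      (pvEConn maps r c E z b ∧ pvEConn maps r c E a w) := by
  constructor
  · rintro ⟨hz, h⟩
    induction h with
    | refl => exact Or.inl (pvEConn_refl hz)
    | @tail x y hzx hadj ih =>
      obtain ⟨hgx, hgy, hmem⟩ := hadj
      have hold : ((x, y) ∈ E ∨ (y, x) ∈ E) →
          pvEConn maps r c E z y ∨
          (pvEConn maps r c E z a ∧ pvEConn maps r c E b y) ∨
          (pvEConn maps r c E z b ∧ pvEConn maps r c E a y) := by
        intro hm
        rcases ih with h1 | ⟨h2a, h2b⟩ | ⟨h3a, h3b⟩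
        · exact Or.inl ⟨h1.1, h1.2.tail ⟨hgx, hgy, hm⟩⟩
        · exact Or.inr (Or.inl ⟨h2a, ⟨h2b.1, h2b.2.tail ⟨hgx, hgy, hm⟩⟩⟩)
        · exact Or.inr (Or.inr ⟨h3a, ⟨h3b.1, h3b.2.tail ⟨hgx, hgy, hm⟩⟩⟩)
      rcases hmem with hm | hm
      · rcases List.mem_append.mp hm with hm | hm
        · exact hold (Or.inl hm)
        · have he := List.mem_singleton.mp hm
          have hx : x = a := congrArg Prod.fst he
          have hy : y = b := congrArg Prod.snd he
          subst hx; subst hy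
          rcases ih with h1 | ⟨h2a, h2b⟩ | ⟨h3a, h3b⟩
          · exact Or.inr (Or.inl ⟨h1, pvEConn_refl hb⟩)
          · exact Or.inr (Or.inl ⟨h2a, pvEConn_refl hb⟩)
          · exact Or.inl h3a
      · rcases List.mem_append.mp hm with hm | hm
        · exact hold (Or.inr hm)
        · have he := List.mem_singleton.mp hm
          have hx : x = b := congrArg Prod.snd he
          have hy : y = a := congrArg Prod.fst he
          subst hx; subst hy
          rcases ih with h1 | ⟨h2a, h2b⟩ | ⟨h3a, h3b⟩
          · exact Or.inr (Or.inr ⟨h1, pvEConn_refl ha⟩)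
          · exact Or.inl h2a
          · exact Or.inr (Or.inr ⟨h3a, pvEConn_refl ha⟩)
  · have hmono : ∀ {x y : Int × Int}, pvEConn maps r c E x y →
        pvEConn maps r c (E ++ [(a, b)]) x y :=
      fun h => pvEConn_mono (fun e he => List.mem_append_left _ he) h
    rintro (h | ⟨h1, h2⟩ | ⟨h1, h2⟩)
    · exact hmono h
    · have hab : pvEAdj maps r c (E ++ [(a, b)]) a b :=
        ⟨ha, hb, Or.inl (List.mem_append_right _ (List.mem_singleton_self _))⟩
      exact ⟨h1.1, ((hmono h1).2.tail hab).trans (hmono h2).2⟩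
    · have hba : pvEAdj maps r c (E ++ [(a, b)]) b a :=
        ⟨hb, ha, Or.inr (List.mem_append_right _ (List.mem_singleton_self _))⟩
      exact ⟨h1.1, ((hmono h1).2.tail hba).trans (hmono h2).2⟩

-- leaders ----------------------------------------------------------------------
def pvLeaderE (maps : List String) (r c : Int) (E : List ((Int × Int) × (Int × Int)))
    (z : Int × Int) : Prop :=
  pvGood maps r c z ∧ ∀ w, pvEConn maps r c E z w → ¬ pvLt w z

lemma pvLeaderE_unique {maps : List String} {r c : Int} {E : List ((Int × Int) × (Int × Int))}
    {a b : Int × Int} (hc : pvEConn maps r c E a b)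
    (h1 : pvLeaderE maps r c E a) (h2 : pvLeaderE maps r c E b) : a = b := by
  by_contra hne
  rcases pvLt_total hne with h | h
  · exact h2.2 a (pvEConn_symm hc) h
  · exact h1.2 b hc h

lemma pvLeaderE_iff_of_iff {maps : List String} {r c : Int}
    {E E' : List ((Int × Int) × (Int × Int))}
    (h : ∀ z w, pvEConn maps r c E z w ↔ pvEConn maps r c E' z w) (z : Int × Int) :
    pvLeaderE maps r c E z ↔ pvLeaderE maps r c E' z := by
  unfold pvLeaderE
  constructor
  · rintro ⟨hg, hl⟩; exact ⟨hg, fun w hw => hl w ((h z w).mpr hw)⟩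
  · rintro ⟨hg, hl⟩; exact ⟨hg, fun w hw => hl w ((h z w).mp hw)⟩

-- the union-find invariant -----------------------------------------------------
def pvInv (maps : List String) (r c : Int) (E : List ((Int × Int) × (Int × Int)))
    (p : PySem.Dict (Int × Int) (Int × Int)) : Prop :=
  (∀ z, ((p.get? z).isSome = true) ↔ pvGood maps r c z) ∧
  (∀ z w, p.get? z = some w →
    pvEConn maps r c E z w ∧ ¬ pvLt z w ∧ (w = z ↔ pvLeaderE maps r c E z))

lemma pvInv_congr {maps : List String} {r c : Int} {E E' : List ((Int × Int) × (Int × Int))}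
    {p : PySem.Dict (Int × Int) (Int × Int)}
    (h : ∀ z w, pvEConn maps r c E z w ↔ pvEConn maps r c E' z w)
    (hinv : pvInv maps r c E p) : pvInv maps r c E' p := by
  refine ⟨hinv.1, fun z w hzw => ?_⟩
  obtain ⟨h1, h2, h3⟩ := hinv.2 z w hzw
  exact ⟨(h z w).mp h1, h2, h3.trans (pvLeaderE_iff_of_iff h z)⟩

-- the termination measure of `find` --------------------------------------------
def pvEnc (c : Int) (z : Int × Int) : Nat := (z.1 * c + z.2).toNat

lemma pvEnc_lt {maps : List String} {r c : Int} {w z : Int × Int}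
    (hw : pvGood maps r c w) (hz : pvGood maps r c z) (h : pvLt w z) :
    pvEnc c w < pvEnc c z := by
  obtain ⟨hw1, hw2, hw3, hw4, -⟩ := hw
  obtain ⟨hz1, hz2, hz3, hz4, -⟩ := hz
  unfold pvEnc
  have e3 : 0 ≤ z.1 * c := mul_nonneg (by omega) (by omega)
  have e4 : 0 ≤ w.1 * c := mul_nonneg (by omega) (by omega)
  rcases h with h | ⟨h1, h2⟩
  · have e1 : (w.1 + 1) * c ≤ z.1 * c := mul_le_mul_of_nonneg_right (by omega) (by omega)
    have e2 : (w.1 + 1) * c = w.1 * c + c := by ring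
    omega
  · rw [h1]; omega

lemma pvEnc_bound {maps : List String} {r c : Int} {z : Int × Int}
    (hz : pvGood maps r c z) : pvEnc c z < r.toNat * c.toNat := by
  obtain ⟨h1, h2, h3, h4, -⟩ := hz
  unfold pvEnc
  have hc : (0:Int) < c := by omega
  have hr : (0:Int) ≤ r := by omega
  have e1 : (z.1 + 1) * c ≤ r * c := mul_le_mul_of_nonneg_right (by omega) (by omega)
  have e2 : (z.1 + 1) * c = z.1 * c + c := by ring
  have e3 : 0 ≤ z.1 * c := mul_nonneg (by omega) (by omega)
  have h5 : z.1 * c + z.2 < r * c := by omega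
  have h7 : (r * c).toNat = r.toNat * c.toNat := by
    obtain ⟨n, rfl⟩ := Int.eq_ofNat_of_zero_le hr
    obtain ⟨m, rfl⟩ := Int.eq_ofNat_of_zero_le (by omega : (0:Int) ≤ c)
    rw [← Nat.cast_mul, Int.toNat_natCast, Int.toNat_natCast, Int.toNat_natCast]
  omega

-- `find` follows parent pointers to the unique class leader ----------------------
lemma pvFind_spec {maps : List String} {r c : Int} {E : List ((Int × Int) × (Int × Int))}
    {p : PySem.Dict (Int × Int) (Int × Int)} (hinv : pvInv maps r c E p) :
    ∀ (f : Nat) (z : Int × Int), pvGood maps r c z → pvEnc c z < f →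
      pvEConn maps r c E z (altFind p f z) ∧ pvLeaderE maps r c E (altFind p f z) := by
  intro f
  induction f with
  | zero => intro z _ h; omega
  | succ f ih =>
    intro z hz hf
    have hkey : (p.get? z).isSome = true := (hinv.1 z).mpr hz
    obtain ⟨w, hw⟩ := Option.isSome_iff_exists.mp hkey
    obtain ⟨hconn, hle, hiff⟩ := hinv.2 z w hw
    have hgd : p.getD z z = w := PySem.Dict.getD_of_get?_eq_some _ _ hw
    by_cases hwz : w = z
    · have : altFind p (f + 1) z = z := by
        simp [altFind, hgd, hwz]
      rw [this]
      exact ⟨pvEConn_refl hz, hiff.mp hwz⟩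
    · have hstep : altFind p (f + 1) z = altFind p f w := by
        simp only [altFind, hgd, if_neg hwz]
      have hgw : pvGood maps r c w := pvEConn_good_right hconn
      have hlt : pvLt w z := by
        rcases pvLt_total hwz with h | h
        · exact h
        · exact absurd h hle
      have henc : pvEnc c w < f := by
        have := pvEnc_lt hgw hz hlt
        omega
      obtain ⟨ih1, ih2⟩ := ih w hgw henc
      rw [hstep]
      exact ⟨pvEConn_trans hconn ih1, ih2⟩

lemma pvFind_leader {maps : List String} {r c : Int} {E : List ((Int × Int) × (Int × Int))}
    {p : PySem.Dict (Int × Int) (Int × Int)} (hinv : pvInv maps r c E p)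
    {z : Int × Int} (hld : pvLeaderE maps r c E z) {f : Nat} (hf : 0 < f) :
    altFind p f z = z := by
  cases f with
  | zero => omega
  | succ f =>
    have hkey : (p.get? z).isSome = true := (hinv.1 z).mpr hld.1
    obtain ⟨w, hw⟩ := Option.isSome_iff_exists.mp hkey
    have hwz : w = z := ((hinv.2 z w hw).2.2).mpr hld
    have hgd : p.getD z z = w := PySem.Dict.getD_of_get?_eq_some _ _ hw
    simp [altFind, hgd, hwz]

lemma pvFind_eq_of_conn {maps : List String} {r c : Int} {E : List ((Int × Int) × (Int × Int))}
    {p : PySem.Dict (Int × Int) (Int × Int)} (hinv : pvInv maps r c E p)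
    {z w : Int × Int} (hc : pvEConn maps r c E z w) {f : Nat}
    (hfz : pvEnc c z < f) (hfw : pvEnc c w < f) :
    altFind p f z = altFind p f w := by
  have hz := hc.1
  have hw := pvEConn_good_right hc
  obtain ⟨hc1, hl1⟩ := pvFind_spec hinv f z hz hfz
  obtain ⟨hc2, hl2⟩ := pvFind_spec hinv f w hw hfw
  exact pvLeaderE_unique (pvEConn_trans (pvEConn_trans (pvEConn_symm hc1) hc) hc2) hl1 hl2

-- phase 1: parent = {cell: cell for each non-'X' cell} ---------------------------
def pvP0 (maps : List String) (r c : Int) : PySem.Dict (Int × Int) (Int × Int) :=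
  (pvCells r c).foldl (fun d z =>
    if pvCharAt maps z.1 z.2 ≠ some 'X' then d.insert z z else d) PySem.Dict.empty

lemma phase1_get? (maps : List String) :
    ∀ (L : List (Int × Int)) (d : PySem.Dict (Int × Int) (Int × Int)) (x : Int × Int),
    ((L.foldl (fun d z => if pvCharAt maps z.1 z.2 ≠ some 'X' then d.insert z z else d) d).get? x)
    = if x ∈ L ∧ pvCharAt maps x.1 x.2 ≠ some 'X' then some x else d.get? x := by
  intro L
  induction L with
  | nil => intro d x; simp
  | cons a L ih =>
    intro d x
    rw [List.foldl_cons, ih]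
    by_cases hx : x ∈ L ∧ pvCharAt maps x.1 x.2 ≠ some 'X'
    · rw [if_pos hx, if_pos ⟨List.mem_cons_of_mem _ hx.1, hx.2⟩]
    · rw [if_neg hx]
      by_cases hcons : x ∈ a :: L ∧ pvCharAt maps x.1 x.2 ≠ some 'X'
      · have hxa : x = a := by
          rcases List.mem_cons.mp hcons.1 with h | h
          · exact h
          · exact absurd ⟨h, hcons.2⟩ hx
        rw [if_pos hcons]
        subst hxa
        rw [if_pos hcons.2, PySem.Dict.get?_insert_self]
      · rw [if_neg hcons]
        by_cases hca : pvCharAt maps a.1 a.2 ≠ some 'X'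
        · rw [if_pos hca]
          have hxa : x ≠ a := by
            intro he; subst he; exact hcons ⟨List.mem_cons_self, hca⟩
          rw [PySem.Dict.get?_insert, if_neg hxa]
        · rw [if_neg hca]

lemma pvP0_inv (maps : List String) (r c : Int) : pvInv maps r c [] (pvP0 maps r c) := by
  constructor
  · intro z
    unfold pvP0
    rw [phase1_get? maps (pvCells r c) PySem.Dict.empty z]
    by_cases h : z ∈ pvCells r c ∧ pvCharAt maps z.1 z.2 ≠ some 'X'
    · rw [if_pos h]
      simp only [Option.isSome_some, true_iff]
      obtain ⟨h1, h2⟩ := h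
      obtain ⟨b1, b2, b3, b4⟩ := mem_pvCells.mp h1
      exact ⟨b1, b2, b3, b4, h2⟩
    · rw [if_neg h]
      simp only [PySem.Dict.get?_empty, Option.isSome_none, Bool.false_eq_true, false_iff]
      intro hg
      exact h ⟨pvGood_mem_cells hg, hg.2.2.2.2⟩
  · intro z w hzw
    unfold pvP0 at hzw
    rw [phase1_get? maps (pvCells r c) PySem.Dict.empty z] at hzw
    by_cases h : z ∈ pvCells r c ∧ pvCharAt maps z.1 z.2 ≠ some 'X'
    · rw [if_pos h] at hzw
      have hwz : w = z := by injection hzw.symm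
      obtain ⟨h1, h2⟩ := h
      obtain ⟨b1, b2, b3, b4⟩ := mem_pvCells.mp h1
      have hg : pvGood maps r c z := ⟨b1, b2, b3, b4, h2⟩
      rw [hwz]
      refine ⟨pvEConn_refl hg, pvLt_irrefl z, iff_of_true rfl ⟨hg, fun u hu => ?_⟩⟩
      obtain ⟨-, rfl⟩ := pvEConn_nil.mp hu
      exact pvLt_irrefl _
    · rw [if_neg h] at hzw
      simp at hzw

-- phase 2: inserting a parent pointer from one class root to the other -----------
lemma pvInsert_inv {maps : List String} {r c : Int} {E : List ((Int × Int) × (Int × Int))}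
    {p : PySem.Dict (Int × Int) (Int × Int)} (hinv : pvInv maps r c E p)
    {z nb : Int × Int} (hz : pvGood maps r c z) (hnb : pvGood maps r c nb)
    {M m : Int × Int} (hMld : pvLeaderE maps r c E M) (hmld : pvLeaderE maps r c E m)
    (hconn : (pvEConn maps r c E z M ∧ pvEConn maps r c E nb m) ∨
             (pvEConn maps r c E nb M ∧ pvEConn maps r c E z m))
    (hlt : pvLt m M) :
    pvInv maps r c (E ++ [(z, nb)]) (p.insert M m) := by
  have hgM : pvGood maps r c M := hMld.1
  have hgm : pvGood maps r c m := hmld.1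
  have hchar := fun x y => pvEConn_append_edge (E := E) hz hnb (z := x) (w := y)
  have hMm : pvEConn maps r c (E ++ [(z, nb)]) M m := by
    rcases hconn with ⟨h1, h2⟩ | ⟨h1, h2⟩
    · exact (hchar M m).mpr (Or.inr (Or.inl ⟨pvEConn_symm h1, h2⟩))
    · exact (hchar M m).mpr (Or.inr (Or.inr ⟨pvEConn_symm h1, h2⟩))
  have hne : m ≠ M := fun he => pvLt_irrefl M (he ▸ hlt)
  constructor
  · intro x
    rw [PySem.Dict.get?_insert]
    by_cases hx : x = M
    · subst hx
      rw [if_pos rfl]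
      simp only [Option.isSome_some, true_iff]
      exact hgM
    · rw [if_neg hx]
      exact hinv.1 x
  · intro x w hxw
    rw [PySem.Dict.get?_insert] at hxw
    by_cases hx : x = M
    · subst hx
      rw [if_pos rfl] at hxw
      have hwm : w = m := by injection hxw.symm
      subst hwm
      refine ⟨hMm, fun hlt' => pvLt_asymm hlt hlt', ?_⟩
      constructor
      · intro he; exact absurd he hne
      · intro hld
        exact absurd (hld.2 w hMm hlt) (fun h => h)
    · rw [if_neg hx] at hxw
      obtain ⟨hcw, hlw, hiffw⟩ := hinv.2 x w hxw
      refine ⟨pvEConn_mono (fun e he => List.mem_append_left _ he) hcw, hlw, ?_⟩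
      constructor
      · intro hwx
        subst hwx
        have hldx : pvLeaderE maps r c E w := hiffw.mp rfl
        refine ⟨hldx.1, fun u hu => ?_⟩
        rcases (hchar w u).mp hu with h1 | ⟨h2a, h2b⟩ | ⟨h3a, h3b⟩
        · exact hldx.2 u h1
        · -- w ~E z, nb ~E u
          rcases hconn with ⟨hzM, hnbm⟩ | ⟨hnbM, hzm⟩
          · -- z's root is M: then w = M, contradiction with x ≠ M
            exact absurd (pvLeaderE_unique (pvEConn_trans h2a hzM) hldx hMld) hx
          · -- z's root is m: w = m; u is in M's class
            have hwm : w = m := pvLeaderE_unique (pvEConn_trans h2a hzm) hldx hmld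
            have hMu : pvEConn maps r c E M u := pvEConn_trans (pvEConn_symm hnbM) h2b
            intro hult
            exact hMld.2 u hMu (pvLt_trans hult (hwm ▸ hlt))
        · rcases hconn with ⟨hzM, hnbm⟩ | ⟨hnbM, hzm⟩
          · have hwm : w = m := pvLeaderE_unique (pvEConn_trans h3a hnbm) hldx hmld
            have hMu : pvEConn maps r c E M u := pvEConn_trans (pvEConn_symm hzM) h3b
            intro hult
            exact hMld.2 u hMu (pvLt_trans hult (hwm ▸ hlt))
          · exact absurd (pvLeaderE_unique (pvEConn_trans h3a hnbM) hldx hMld) hx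
      · intro hld
        refine hiffw.mpr ⟨hld.1, fun u hu => hld.2 u
          (pvEConn_mono (fun e he => List.mem_append_left _ he) hu)⟩

lemma altUnionNb_inv {maps : List String} {r c : Int} {F : Nat}
    (hF : ∀ u, pvGood maps r c u → pvEnc c u < F)
    {E : List ((Int × Int) × (Int × Int))} {p : PySem.Dict (Int × Int) (Int × Int)}
    (hinv : pvInv maps r c E p) {z : Int × Int} (hz : pvGood maps r c z) (nb : Int × Int) :
    pvInv maps r c (E ++ [(z, nb)]) (altUnionNb F p z nb) := by
  by_cases hknb : (p.get? nb).isSome = true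
  · have hnb : pvGood maps r c nb := (hinv.1 nb).mp hknb
    obtain ⟨hcza, hlda⟩ := pvFind_spec hinv F z hz (hF z hz)
    obtain ⟨hcnb, hldb⟩ := pvFind_spec hinv F nb hnb (hF nb hnb)
    by_cases hrr : altFind p F z = altFind p F nb
    · have hstep : altUnionNb F p z nb = p := by
        simp [altUnionNb, hknb, hrr]
      rw [hstep]
      have hczn : pvEConn maps r c E z nb := by
        refine pvEConn_trans hcza ?_
        rw [hrr]
        exact pvEConn_symm hcnb
      refine pvInv_congr (fun x y => ?_) hinv
      rw [pvEConn_append_edge hz hnb]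
      constructor
      · exact Or.inl
      · rintro (h | ⟨u1, u2⟩ | ⟨u1, u2⟩)
        · exact h
        · exact pvEConn_trans u1 (pvEConn_trans hczn u2)
        · exact pvEConn_trans u1 (pvEConn_trans (pvEConn_symm hczn) u2)
    · have hstep : altUnionNb F p z nb =
          p.insert (altMax (altFind p F z) (altFind p F nb))
            (altMin (altFind p F z) (altFind p F nb)) := by
        simp [altUnionNb, hknb, hrr]
      rw [hstep]
      rcases altMax_min_spec (altFind p F z) (altFind p F nb) hrr with ⟨hM, hm, hlt⟩ | ⟨hM, hm, hlt⟩
      · rw [hM, hm]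
        exact pvInsert_inv hinv hz hnb hldb hlda (Or.inr ⟨hcnb, hcza⟩) hlt
      · rw [hM, hm]
        exact pvInsert_inv hinv hz hnb hlda hldb (Or.inl ⟨hcza, hcnb⟩) hlt
  · have hnb : ¬ pvGood maps r c nb := fun hg => hknb ((hinv.1 nb).mpr hg)
    have hstep : altUnionNb F p z nb = p := by
      simp only [altUnionNb]
      rw [if_neg (by simpa using hknb)]
    rw [hstep]
    exact pvInv_congr (fun x y => (pvEConn_append_irrel (fun hc => hnb hc.2)).symm) hinv

lemma altUnionCell_inv {maps : List String} {r c : Int} {F : Nat}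
    (hF : ∀ u, pvGood maps r c u → pvEnc c u < F)
    {E : List ((Int × Int) × (Int × Int))} {p : PySem.Dict (Int × Int) (Int × Int)}
    (hinv : pvInv maps r c E p) (z : Int × Int) :
    pvInv maps r c (E ++ [(z, (z.1 + 1, z.2)), (z, (z.1, z.2 + 1))]) (altUnionCell F p z) := by
  by_cases hkey : (p.get? z).isSome = true
  · have hz : pvGood maps r c z := (hinv.1 z).mp hkey
    have : altUnionCell F p z = altUnionNb F (altUnionNb F p z (z.1 + 1, z.2)) z (z.1, z.2 + 1) := by
      simp [altUnionCell, hkey]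
    rw [this]
    have h1 := altUnionNb_inv hF hinv hz (z.1 + 1, z.2)
    have h2 := altUnionNb_inv hF h1 hz (z.1, z.2 + 1)
    rw [List.append_assoc] at h2
    simpa using h2
  · have hz : ¬ pvGood maps r c z := fun hg => hkey ((hinv.1 z).mpr hg)
    have : altUnionCell F p z = p := by
      simp only [altUnionCell]
      rw [if_neg (by simpa using hkey)]
    rw [this]
    refine pvInv_congr (fun a b => ?_) hinv
    have e1 : (E ++ [(z, (z.1 + 1, z.2)), (z, (z.1, z.2 + 1))]) =
        (E ++ [(z, (z.1 + 1, z.2))]) ++ [(z, (z.1, z.2 + 1))] := by simp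
    rw [e1, pvEConn_append_irrel (fun hc => hz hc.1),
        pvEConn_append_irrel (fun hc => hz hc.1)]

def pvEdgesOf (z : Int × Int) : List ((Int × Int) × (Int × Int)) :=
  [(z, (z.1 + 1, z.2)), (z, (z.1, z.2 + 1))]

lemma unionFold_inv {maps : List String} {r c : Int} {F : Nat}
    (hF : ∀ u, pvGood maps r c u → pvEnc c u < F) :
    ∀ (Q : List (Int × Int)) (E : List ((Int × Int) × (Int × Int)))
      (p : PySem.Dict (Int × Int) (Int × Int)), pvInv maps r c E p →
      pvInv maps r c (E ++ Q.flatMap pvEdgesOf) (Q.foldl (altUnionCell F) p) := by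
  intro Q
  induction Q with
  | nil => intro E p h; simpa using h
  | cons a Q ih =>
    intro E p h
    have h1 := altUnionCell_inv hF h a
    have h2 := ih _ _ h1
    rw [List.flatMap_cons]
    have : E ++ ([(a, (a.1 + 1, a.2)), (a, (a.1, a.2 + 1))] ++ Q.flatMap pvEdgesOf)
        = (E ++ [(a, (a.1 + 1, a.2)), (a, (a.1, a.2 + 1))]) ++ Q.flatMap pvEdgesOf := by
      simp
    rw [List.foldl_cons]
    rw [show pvEdgesOf a = [(a, (a.1 + 1, a.2)), (a, (a.1, a.2 + 1))] from rfl, this]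
    exact h2

def pvF (r c : Int) : Nat := r.toNat * c.toNat + 1

def pvAllE (r c : Int) : List ((Int × Int) × (Int × Int)) := (pvCells r c).flatMap pvEdgesOf

def pvPF (maps : List String) (r c : Int) : PySem.Dict (Int × Int) (Int × Int) :=
  (pvCells r c).foldl (altUnionCell (pvF r c)) (pvP0 maps r c)

lemma pvF_bound {maps : List String} {r c : Int} {u : Int × Int} (h : pvGood maps r c u) :
    pvEnc c u < pvF r c := by
  have := pvEnc_bound h
  unfold pvF
  omega

lemma pvPF_inv (maps : List String) (r c : Int) :
    pvInv maps r c (pvAllE r c) (pvPF maps r c) := by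
  have := unionFold_inv (fun u hu => pvF_bound hu) (pvCells r c) [] (pvP0 maps r c)
    (pvP0_inv maps r c)
  simpa [pvAllE, pvPF] using this

-- the edge list generates exactly 4-neighbour connectivity ----------------------
lemma mem_pvAllE {r c : Int} {e : (Int × Int) × (Int × Int)} :
    e ∈ pvAllE r c ↔ e.1 ∈ pvCells r c ∧
      (e.2 = (e.1.1 + 1, e.1.2) ∨ e.2 = (e.1.1, e.1.2 + 1)) := by
  unfold pvAllE pvEdgesOf
  simp only [List.mem_flatMap, List.mem_cons, List.not_mem_nil, or_false]
  constructor
  · rintro ⟨u, hu, rfl | rfl⟩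
    · exact ⟨hu, Or.inl rfl⟩
    · exact ⟨hu, Or.inr rfl⟩
  · rintro ⟨h1, h2 | h2⟩
    · exact ⟨e.1, h1, Or.inl (by rw [← h2])⟩
    · exact ⟨e.1, h1, Or.inr (by rw [← h2])⟩

lemma pvEAdj_allE {maps : List String} {r c : Int} {z w : Int × Int} :
    pvEAdj maps r c (pvAllE r c) z w ↔ pvAdj maps r c z w := by
  unfold pvEAdj pvAdj
  constructor
  · rintro ⟨h1, h2, h3 | h3⟩
    · obtain ⟨hc, he⟩ := mem_pvAllE.mp h3
      refine ⟨h1, h2, ?_⟩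
      simp only [Prod.ext_iff] at he
      simp only [pvNbrs, List.mem_cons, List.not_mem_nil, or_false, Prod.ext_iff]
      rcases he with he | he <;> omega
    · obtain ⟨hc, he⟩ := mem_pvAllE.mp h3
      refine ⟨h1, h2, ?_⟩
      simp only [Prod.ext_iff] at he
      simp only [pvNbrs, List.mem_cons, List.not_mem_nil, or_false, Prod.ext_iff]
      rcases he with he | he <;> omega
  · rintro ⟨h1, h2, h3⟩
    refine ⟨h1, h2, ?_⟩
    simp only [pvNbrs, List.mem_cons, List.not_mem_nil, or_false] at h3
    rcases h3 with rfl | rfl | rfl | rfl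
    · exact Or.inr (mem_pvAllE.mpr ⟨pvGood_mem_cells h2, Or.inl (by simp)⟩)
    · exact Or.inl (mem_pvAllE.mpr ⟨pvGood_mem_cells h1, Or.inl rfl⟩)
    · exact Or.inr (mem_pvAllE.mpr ⟨pvGood_mem_cells h2, Or.inr (by simp)⟩)
    · exact Or.inl (mem_pvAllE.mpr ⟨pvGood_mem_cells h1, Or.inr rfl⟩)

lemma pvEConn_allE {maps : List String} {r c : Int} {z w : Int × Int} :
    pvEConn maps r c (pvAllE r c) z w ↔ pvConn maps r c z w := by
  unfold pvEConn pvConn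
  constructor
  · rintro ⟨h1, h2⟩
    exact ⟨h1, h2.mono (fun a b h => pvEAdj_allE.mp h)⟩
  · rintro ⟨h1, h2⟩
    exact ⟨h1, h2.mono (fun a b h => pvEAdj_allE.mpr h)⟩

-- the root function of the finished union-find structure ------------------------
def pvRoot (maps : List String) (r c : Int) (z : Int × Int) : Int × Int :=
  altFind (pvPF maps r c) (pvF r c) z

def pvLdr (maps : List String) (r c : Int) (z : Int × Int) : Prop :=
  pvGood maps r c z ∧ ∀ w, pvConn maps r c z w → ¬ pvLt w z

lemma pvLdr_iff {maps : List String} {r c : Int} {z : Int × Int} :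
    pvLeaderE maps r c (pvAllE r c) z ↔ pvLdr maps r c z := by
  unfold pvLeaderE pvLdr
  constructor
  · rintro ⟨h1, h2⟩; exact ⟨h1, fun w hw => h2 w (pvEConn_allE.mpr hw)⟩
  · rintro ⟨h1, h2⟩; exact ⟨h1, fun w hw => h2 w (pvEConn_allE.mp hw)⟩

lemma pvKey_iff {maps : List String} {r c : Int} {z : Int × Int} :
    (((pvPF maps r c).get? z).isSome = true) ↔ pvGood maps r c z :=
  (pvPF_inv maps r c).1 z

lemma pvRoot_spec {maps : List String} {r c : Int} {z : Int × Int} (h : pvGood maps r c z) :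
    pvConn maps r c z (pvRoot maps r c z) ∧ pvLdr maps r c (pvRoot maps r c z) := by
  obtain ⟨h1, h2⟩ := pvFind_spec (pvPF_inv maps r c) (pvF r c) z h (pvF_bound h)
  exact ⟨pvEConn_allE.mp h1, pvLdr_iff.mp h2⟩

lemma pvRoot_self_iff {maps : List String} {r c : Int} {z : Int × Int} (h : pvGood maps r c z) :
    pvRoot maps r c z = z ↔ pvLdr maps r c z := by
  constructor
  · intro he
    have := (pvRoot_spec h).2
    rwa [he] at this
  · intro hl
    exact pvFind_leader (pvPF_inv maps r c) (pvLdr_iff.mpr hl) (by unfold pvF; omega)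

lemma pvRoot_eq_iff {maps : List String} {r c : Int} {z w : Int × Int}
    (hz : pvGood maps r c z) (hw : pvGood maps r c w) :
    pvRoot maps r c z = pvRoot maps r c w ↔ pvConn maps r c z w := by
  constructor
  · intro he
    obtain ⟨c1, -⟩ := pvRoot_spec hz
    obtain ⟨c2, -⟩ := pvRoot_spec hw
    exact pvConn_trans c1 (he ▸ pvConn_symm c2)
  · intro hc
    exact pvFind_eq_of_conn (pvPF_inv maps r c) (pvEConn_allE.mpr hc) (pvF_bound hz) (pvF_bound hw)

lemma pvRoot_le {maps : List String} {r c : Int} {z : Int × Int} (h : pvGood maps r c z) :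
    ¬ pvLt z (pvRoot maps r c z) := by
  obtain ⟨hc, hl⟩ := pvRoot_spec h
  exact hl.2 z (pvConn_symm hc)

-- the result lists both programs produce ----------------------------------------
def pvKeyRoot (maps : List String) (r c : Int) (z : Int × Int) : Bool :=
  ((pvPF maps r c).get? z).isSome && decide (pvRoot maps r c z = z)

def pvInClass (maps : List String) (r c : Int) (m z : Int × Int) : Bool :=
  ((pvPF maps r c).get? z).isSome && decide (pvRoot maps r c z = m)

def pvPartSum (maps : List String) (r c : Int) (P : List (Int × Int)) (m : Int × Int) : Int :=
  ((P.filter (pvInClass maps r c m)).map (fun z => pvVal maps z.1 z.2)).sum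

def pvAns (maps : List String) (r c : Int) (P : List (Int × Int)) : List Int :=
  ((P.filter (pvKeyRoot maps r c)).map (fun m => pvPartSum maps r c (pvCells r c) m)).filter
    (fun v => decide (v ≠ 0))

def pvItems (maps : List String) (r c : Int) (P : List (Int × Int)) :
    List ((Int × Int) × Int) :=
  (P.filter (pvKeyRoot maps r c)).map (fun m => (m, pvPartSum maps r c P m))

-- ===== A-side machinery: characterising the BFS flood fill ======================
def pvValZ (maps : List String) (z : Int × Int) : Int := pvVal maps z.1 z.2

def pvSum (maps : List String) (L : List (Int × Int)) : Int := (L.map (pvValZ maps)).sum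

def pvStep (maps : List String) (r c : Int)
    (st : List (Int × Int) × List (Int × Int)) (nb : Int × Int) :
    List (Int × Int) × List (Int × Int) :=
  if 0 ≤ nb.1 ∧ nb.1 < r ∧ 0 ≤ nb.2 ∧ nb.2 < c ∧ nb ∉ st.1 ∧ pvCharAt maps nb.1 nb.2 ≠ some 'X' then
    (st.1 ++ [nb], st.2 ++ [nb])
  else st

-- cells reachable from the worklist q through good cells outside the visited set V
inductive pvReach (maps : List String) (r c : Int) (V q : List (Int × Int)) : (Int × Int) → Prop
  | base {z} : z ∈ q → pvReach maps r c V q z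
  | step {a b} : pvReach maps r c V q a → b ∈ pvNbrs a.1 a.2 → pvGood maps r c b →
      b ∉ V → pvReach maps r c V q b

noncomputable def pvUniv (r c : Int) : Finset (Int × Int) := Finset.Icc 0 (r - 1) ×ˢ Finset.Icc 0 (c - 1)

noncomputable def pvMu (r c : Int) (V q : List (Int × Int)) : Nat :=
  (pvUniv r c \ V.toFinset).card + q.length

lemma pvGood_mem_univ (maps : List String) (r c : Int) (z : Int × Int)
    (h : pvGood maps r c z) : z ∈ pvUniv r c := by
  obtain ⟨h1, h2, h3, h4, _⟩ := h
  simp only [pvUniv, Finset.mem_product, Finset.mem_Icc]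
  omega

lemma pvUniv_card (r c : Int) : (pvUniv r c).card = r.toNat * c.toNat := by
  rw [pvUniv, Finset.card_product, Int.card_Icc, Int.card_Icc]
  have e1 : (r - 1 + 1 - 0 : Int) = r := by ring
  have e2 : (c - 1 + 1 - 0 : Int) = c := by ring
  rw [e1, e2]

lemma pvMu_le (r c : Int) (V : List (Int × Int)) (z : Int × Int) :
    pvMu r c V [z] ≤ r.toNat * c.toNat + 1 := by
  unfold pvMu
  have h1 := Finset.card_le_card (Finset.sdiff_subset (s := pvUniv r c) (t := V.toFinset))
  have h2 := pvUniv_card r c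
  simp only [List.length_cons, List.length_nil]
  omega

-- the common push step: folding pvStep over a candidate list appends exactly the
-- good unvisited candidates to both the visited set and the worklist
lemma pvPush_spec (maps : List String) (r c : Int) :
    ∀ (L : List (Int × Int)) (V q : List (Int × Int)),
    ∃ N, L.foldl (pvStep maps r c) (V, q) = (V ++ N, q ++ N) ∧
      N.Nodup ∧ (∀ z ∈ N, z ∉ V ∧ z ∈ L ∧ pvGood maps r c z) ∧
      (∀ b ∈ L, pvGood maps r c b → b ∈ V ++ N) := by
  intro L
  induction L with
  | nil => exact fun V q => ⟨[], by simp, List.nodup_nil, by simp, by simp⟩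
  | cons a L ih =>
    intro V q
    by_cases hC : 0 ≤ a.1 ∧ a.1 < r ∧ 0 ≤ a.2 ∧ a.2 < c ∧ a ∉ V ∧ pvCharAt maps a.1 a.2 ≠ some 'X'
    · have hstep : pvStep maps r c (V, q) a = (V ++ [a], q ++ [a]) := by
        simp only [pvStep, if_pos hC]
      obtain ⟨N', heq, hnd, hprops, hcov⟩ := ih (V ++ [a]) (q ++ [a])
      have hgood : pvGood maps r c a := ⟨hC.1, hC.2.1, hC.2.2.1, hC.2.2.2.1, hC.2.2.2.2.2⟩
      refine ⟨a :: N', ?_, ?_, ?_, ?_⟩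
      · rw [List.foldl_cons, hstep, heq]
        simp [List.append_assoc]
      · exact List.nodup_cons.mpr
          ⟨fun haN => (hprops a haN).1 (List.mem_append_right _ (List.mem_singleton_self a)), hnd⟩
      · intro z hz
        rcases List.mem_cons.mp hz with rfl | hz'
        · exact ⟨hC.2.2.2.2.1, List.mem_cons_self, hgood⟩
        · obtain ⟨hzv, hzl, hzg⟩ := hprops z hz'
          exact ⟨fun hv => hzv (List.mem_append_left _ hv), List.mem_cons_of_mem _ hzl, hzg⟩
      · intro b hb hg
        rcases List.mem_cons.mp hb with rfl | hb'
        · exact List.mem_append_right _ (List.mem_cons_self)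
        · have := hcov b hb' hg
          simpa [List.append_assoc] using this
    · have hstep : pvStep maps r c (V, q) a = (V, q) := by
        simp only [pvStep, if_neg hC]
      obtain ⟨N, heq, hnd, hprops, hcov⟩ := ih V q
      refine ⟨N, by rw [List.foldl_cons, hstep]; exact heq, hnd, ?_, ?_⟩
      · intro z hz
        obtain ⟨hzv, hzl, hzg⟩ := hprops z hz
        exact ⟨hzv, List.mem_cons_of_mem _ hzl, hzg⟩
      · intro b hb hg
        rcases List.mem_cons.mp hb with rfl | hb'
        · obtain ⟨g1, g2, g3, g4, g5⟩ := hg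
          have hbV : b ∈ V := by tauto
          exact List.mem_append_left _ hbV
        · exact hcov b hb' hg

-- A's direction-indexed push loop is the fold of the same step over the 4 neighbours
lemma pvFoldA_eq (maps : List String) (r c cx cy : Int) (V q : List (Int × Int)) :
    (PySem.List.pyRange 0 4 1).foldl (solPush maps r c cx cy) (V, q) =
    (pvNbrs cx cy).foldl (pvStep maps r c) (V, q) := by
  have h4 : PySem.List.pyRange 0 4 1 = [0, 1, 2, 3] := by decide
  have e0 : ∀ st, solPush maps r c cx cy st 0 = pvStep maps r c st (cx - 1, cy) := by
    have d1 : (PySem.List.pyGet? solDirsX 0).getD 0 = -1 := by decide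
    have d2 : (PySem.List.pyGet? solDirsY 0).getD 0 = 0 := by decide
    intro st; simp only [solPush, d1, d2, pvStep, add_zero, sub_eq_add_neg]
  have e1 : ∀ st, solPush maps r c cx cy st 1 = pvStep maps r c st (cx + 1, cy) := by
    have d1 : (PySem.List.pyGet? solDirsX 1).getD 0 = 1 := by decide
    have d2 : (PySem.List.pyGet? solDirsY 1).getD 0 = 0 := by decide
    intro st; simp only [solPush, d1, d2, pvStep, add_zero]
  have e2 : ∀ st, solPush maps r c cx cy st 2 = pvStep maps r c st (cx, cy - 1) := by
    have d1 : (PySem.List.pyGet? solDirsX 2).getD 0 = 0 := by decide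
    have d2 : (PySem.List.pyGet? solDirsY 2).getD 0 = -1 := by decide
    intro st; simp only [solPush, d1, d2, pvStep, add_zero, sub_eq_add_neg]
  have e3 : ∀ st, solPush maps r c cx cy st 3 = pvStep maps r c st (cx, cy + 1) := by
    have d1 : (PySem.List.pyGet? solDirsX 3).getD 0 = 0 := by decide
    have d2 : (PySem.List.pyGet? solDirsY 3).getD 0 = 1 := by decide
    intro st; simp only [solPush, d1, d2, pvStep, add_zero]
  rw [h4]
  simp only [pvNbrs, List.foldl_cons, List.foldl_nil, e0, e1, e2, e3]

-- reachability only shrinks when the start queue grows into reachable cells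
lemma pvReach_mono (maps : List String) (r c : Int) (V q V1 q1 : List (Int × Int))
    (hq : ∀ x ∈ q1, pvReach maps r c V q x) (hV : ∀ z ∈ V, z ∈ V1) {z : Int × Int}
    (h : pvReach maps r c V1 q1 z) : pvReach maps r c V q z := by
  induction h with
  | base hz => exact hq _ hz
  | step _ hnb hg hb ih => exact pvReach.step ih hnb hg (fun hzV => hb (hV _ hzV))

-- spec of A's BFS loop (pop at the front)
lemma pvLoopA_spec (maps : List String) (r c : Int) :
    ∀ (f : Nat) (V q : List (Int × Int)) (s : Int),
    pvMu r c V q ≤ f → V.Nodup → q.Nodup → (∀ x ∈ q, x ∈ V) →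
    ∃ N, solLoop maps r c f V q s = (V ++ N, s + pvSum maps q + pvSum maps N) ∧
      N.Nodup ∧ (∀ z ∈ N, z ∉ V) ∧ (∀ z ∈ N, pvReach maps r c V q z) ∧
      (∀ a, (a ∈ q ∨ a ∈ N) → ∀ b ∈ pvNbrs a.1 a.2, pvGood maps r c b → b ∈ V ++ N) := by
  intro f
  induction f with
  | zero =>
    intro V q s hmu hV hq hqV
    have hq0 : q = [] := by
      refine List.eq_nil_of_length_eq_zero ?_
      unfold pvMu at hmu; omega
    subst hq0
    exact ⟨[], by simp [solLoop, pvSum], List.nodup_nil, by simp, by simp, by simp⟩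
  | succ f ih =>
    intro V q s hmu hV hq hqV
    match q with
    | [] => exact ⟨[], by simp [solLoop, pvSum], List.nodup_nil, by simp, by simp, by simp⟩
    | (cx, cy) :: qt =>
      obtain ⟨N₀, hfold, hN₀nd, hN₀props, hN₀cov⟩ := pvPush_spec maps r c (pvNbrs cx cy) V qt
      have hstep : solLoop maps r c (f + 1) V ((cx, cy) :: qt) s
          = solLoop maps r c f (V ++ N₀) (qt ++ N₀) (s + pvVal maps cx cy) := by
        simp only [solLoop]
        rw [pvFoldA_eq, hfold]
      have hN₀sub : N₀.toFinset ⊆ pvUniv r c \ V.toFinset := by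
        intro z hz
        obtain ⟨h1, _, h3⟩ := hN₀props z (List.mem_toFinset.mp hz)
        exact Finset.mem_sdiff.mpr ⟨pvGood_mem_univ _ _ _ _ h3, fun hv => h1 (List.mem_toFinset.mp hv)⟩
      have hcard : (pvUniv r c \ (V ++ N₀).toFinset).card
          = (pvUniv r c \ V.toFinset).card - N₀.length := by
        have hset : pvUniv r c \ (V ++ N₀).toFinset = (pvUniv r c \ V.toFinset) \ N₀.toFinset := by
          ext z; simp [Finset.mem_sdiff]; tauto
        rw [hset, Finset.card_sdiff_of_subset hN₀sub, List.toFinset_card_of_nodup hN₀nd]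
      have hlen : N₀.length ≤ (pvUniv r c \ V.toFinset).card := by
        rw [← List.toFinset_card_of_nodup hN₀nd]
        exact Finset.card_le_card hN₀sub
      have hmu' : pvMu r c (V ++ N₀) (qt ++ N₀) ≤ f := by
        unfold pvMu at hmu ⊢
        rw [hcard, List.length_append]
        simp only [List.length_cons] at hmu
        omega
      have hVnd' : (V ++ N₀).Nodup :=
        List.nodup_append'.mpr ⟨hV, hN₀nd, by intro a ha hb; exact (hN₀props a hb).1 ha⟩
      have hqtV : ∀ x ∈ qt, x ∈ V := fun x hx => hqV x (List.mem_cons_of_mem _ hx)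
      have hqnd' : (qt ++ N₀).Nodup :=
        List.nodup_append'.mpr ⟨(List.nodup_cons.mp hq).2, hN₀nd,
          by intro a ha hb; exact (hN₀props a hb).1 (hqtV a ha)⟩
      have hqV' : ∀ x ∈ qt ++ N₀, x ∈ V ++ N₀ := by
        intro x hx
        rcases List.mem_append.mp hx with h | h
        · exact List.mem_append_left _ (hqtV x h)
        · exact List.mem_append_right _ h
      obtain ⟨N', heq', hnd', hnotV', hreach', hcov'⟩ :=
        ih (V ++ N₀) (qt ++ N₀) (s + pvVal maps cx cy) hmu' hVnd' hqnd' hqV'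
      have hreachN₀ : ∀ z ∈ N₀, pvReach maps r c V ((cx, cy) :: qt) z := by
        intro z hz
        obtain ⟨h1, h2, h3⟩ := hN₀props z hz
        exact pvReach.step (pvReach.base List.mem_cons_self) h2 h3 h1
      refine ⟨N₀ ++ N', ?_, ?_, ?_, ?_, ?_⟩
      · rw [hstep, heq']
        refine Prod.ext ?_ ?_
        · simp [List.append_assoc]
        · simp only [pvSum, List.map_append, List.sum_append, List.map_cons, List.sum_cons, pvValZ]
          ring
      · refine List.nodup_append'.mpr ⟨hN₀nd, hnd', ?_⟩
        intro a ha hb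
        exact hnotV' a hb (List.mem_append_right _ ha)
      · intro z hz
        rcases List.mem_append.mp hz with h | h
        · exact (hN₀props z h).1
        · exact fun hv => hnotV' z h (List.mem_append_left _ hv)
      · intro z hz
        rcases List.mem_append.mp hz with h | h
        · exact hreachN₀ z h
        · refine pvReach_mono maps r c V ((cx, cy) :: qt) (V ++ N₀) (qt ++ N₀) ?_
            (fun w hw => List.mem_append_left _ hw) (hreach' z h)
          intro x hx
          rcases List.mem_append.mp hx with h' | h'
          · exact pvReach.base (List.mem_cons_of_mem _ h')
          · exact hreachN₀ x h'
      · intro a ha b hnb hg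
        have goal_of : b ∈ (V ++ N₀) ++ N' → b ∈ V ++ (N₀ ++ N') := by
          intro h; simpa [List.append_assoc] using h
        rcases ha with ha | ha
        · rcases List.mem_cons.mp ha with rfl | ha'
          · have := hN₀cov b hnb hg
            refine goal_of (List.mem_append_left _ this)
          · exact goal_of (hcov' a (Or.inl (List.mem_append_left _ ha')) b hnb hg)
        · rcases List.mem_append.mp ha with h' | h'
          · exact goal_of (hcov' a (Or.inl (List.mem_append_right _ h')) b hnb hg)
          · exact goal_of (hcov' a (Or.inr h') b hnb hg)

-- every reachable cell ends up in the final visited set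
lemma pvReach_complete (maps : List String) (r c : Int) (V q N : List (Int × Int))
    (hqV : ∀ x ∈ q, x ∈ V)
    (cov : ∀ a, (a ∈ q ∨ a ∈ N) → ∀ b ∈ pvNbrs a.1 a.2, pvGood maps r c b → b ∈ V ++ N) :
    ∀ z, pvReach maps r c V q z → z ∈ V ++ N ∧ (z ∈ q ∨ z ∉ V) := by
  intro z hz
  induction hz with
  | @base z hz => exact ⟨List.mem_append_left _ (hqV _ hz), Or.inl hz⟩
  | @step a b _ hnb hg hb ih =>
    obtain ⟨haVN, hcase⟩ := ih
    refine ⟨?_, Or.inr hb⟩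
    rcases hcase with hq | hVn
    · exact cov a (Or.inl hq) b hnb hg
    · rcases List.mem_append.mp haVN with hV | hN
      · exact absurd hV hVn
      · exact cov a (Or.inr hN) b hnb hg

-- BFS reach from a fresh cell = its connected component -------------------------
lemma pvReach_to_conn {maps : List String} {r c : Int} {V : List (Int × Int)}
    {q0 z : Int × Int} (hg : pvGood maps r c q0) (h : pvReach maps r c V [q0] z) :
    pvConn maps r c q0 z := by
  induction h with
  | base hz =>
    obtain rfl := List.mem_singleton.mp hz
    exact pvConn_refl hg
  | step _ hnb hgb hbV ih =>
    exact ⟨hg, ih.2.tail ⟨pvConn_good_right ih, hgb, hnb⟩⟩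

lemma pvConn_to_reach {maps : List String} {r c : Int} {V : List (Int × Int)}
    {q0 : Int × Int} (hcl : ∀ u v, u ∈ V → pvConn maps r c u v → v ∈ V) (hqV : q0 ∉ V) :
    ∀ z, pvConn maps r c q0 z → pvReach maps r c (V ++ [q0]) [q0] z := by
  rintro z ⟨hg, h⟩
  induction h with
  | refl => exact pvReach.base List.mem_cons_self
  | @tail x y hx hadj ih =>
    by_cases hy : y = q0
    · subst hy; exact pvReach.base List.mem_cons_self
    · have hconn_y : pvConn maps r c q0 y := ⟨hg, hx.tail hadj⟩
      have hyV : y ∉ V := fun hyv => hqV (hcl y q0 hyv (pvConn_symm hconn_y))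
      have hyV' : y ∉ V ++ [q0] := by
        intro hm
        rcases List.mem_append.mp hm with hm | hm
        · exact hyV hm
        · exact hy (List.mem_singleton.mp hm)
      exact pvReach.step ih hadj.2.2 hadj.2.1 hyV'

-- ===== the outer loop of A ======================================================
lemma pvAInv (maps : List String) (r c : Int) :
    ∀ (Q P : List (Int × Int)) (st : List Int × List (Int × Int)),
    P ++ Q = pvCells r c →
    (∀ x, x ∈ st.2 ↔ ∃ q ∈ P, pvConn maps r c q x) →
    st.2.Nodup →
    st.1 = pvAns maps r c P →
    (Q.foldl (fun st z => solCellA maps r c st z.1 z.2) st).1 = pvAns maps r c (P ++ Q) := by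
  intro Q
  induction Q with
  | nil =>
    intro P st h hmem hnd hans
    simpa using hans
  | cons z Q ih =>
    intro P st hPQ hmem hnd hans
    obtain ⟨hPlt, hPcomp, hzP, hPnd⟩ := prefix_facts hPQ
    have hzc : z ∈ pvCells r c := by
      rw [← hPQ]; exact List.mem_append_right _ List.mem_cons_self
    obtain ⟨hb1, hb2, hb3, hb4⟩ := mem_pvCells.mp hzc
    rw [List.foldl_cons, show P ++ z :: Q = (P ++ [z]) ++ Q by simp]
    have hassoc : (P ++ [z]) ++ Q = pvCells r c := by
      rw [List.append_assoc]; exact hPQ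
    by_cases hch : pvCharAt maps z.1 z.2 ≠ some 'X'
    · have hg : pvGood maps r c z := ⟨hb1, hb2, hb3, hb4, hch⟩
      by_cases hzV : z ∈ st.2
      · -- already visited: bfs returns None, nothing changes
        have hstA : solCellA maps r c st z.1 z.2 = st := by
          simp [solCellA, solBfs, hch, hzV]
        rw [hstA]
        have hnl : ¬ pvLdr maps r c z := by
          obtain ⟨q0, hq0, hc0⟩ := (hmem z).mp hzV
          intro hl
          exact hl.2 q0 (pvConn_symm hc0) (hPlt q0 hq0)
        refine ih (P ++ [z]) st hassoc ?_ hnd ?_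
        · intro x
          rw [hmem x]
          constructor
          · rintro ⟨q, hq, hc⟩; exact ⟨q, List.mem_append_left _ hq, hc⟩
          · rintro ⟨q, hq, hc⟩
            rcases List.mem_append.mp hq with hq | hq
            · exact ⟨q, hq, hc⟩
            · obtain rfl := List.mem_singleton.mp hq
              obtain ⟨q0, hq0, hc0⟩ := (hmem q).mp hzV
              exact ⟨q0, hq0, pvConn_trans hc0 hc⟩
        · rw [hans]
          have hkrz : pvKeyRoot maps r c z = false := by
            have hne : pvRoot maps r c z ≠ z := fun he => hnl ((pvRoot_self_iff hg).mp he)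
            simp [pvKeyRoot, hne]
          simp [pvAns, List.filter_append, hkrz]
      · -- fresh component: the BFS visits exactly this component and returns its sum
        have hmu : pvMu r c (st.2 ++ [z]) [z] ≤ r.toNat * c.toNat + 1 := pvMu_le r c _ z
        have hVnd : (st.2 ++ [z]).Nodup :=
          List.nodup_append'.mpr ⟨hnd, List.nodup_singleton _,
            by intro a ha hb; exact hzV (List.mem_singleton.mp hb ▸ ha)⟩
        obtain ⟨N, heq, hndN, hnotV, hreach, hcov⟩ :=
          pvLoopA_spec maps r c (r.toNat * c.toNat + 1) (st.2 ++ [z]) [z] 0 hmu hVnd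
            (List.nodup_singleton _) (fun x hx => List.mem_append_right _ hx)
        have hcl : ∀ u v, u ∈ st.2 → pvConn maps r c u v → v ∈ st.2 := by
          intro u v hu hc
          obtain ⟨q0, hq0, hc0⟩ := (hmem u).mp hu
          exact (hmem v).mpr ⟨q0, hq0, pvConn_trans hc0 hc⟩
        have hcompN : ∀ x, x ∈ z :: N ↔ pvConn maps r c z x := by
          intro x
          constructor
          · intro hx
            rcases List.mem_cons.mp hx with rfl | hx
            · exact pvConn_refl hg
            · exact pvReach_to_conn hg (hreach x hx)
          · intro hc
            have hxV : x ∉ st.2 := by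
              intro hxv
              obtain ⟨q0, hq0, hc0⟩ := (hmem x).mp hxv
              exact hzV ((hmem z).mpr ⟨q0, hq0, pvConn_trans hc0 (pvConn_symm hc)⟩)
            have hr := pvConn_to_reach hcl hzV x hc
            have hin := (pvReach_complete maps r c (st.2 ++ [z]) [z] N
              (fun x hx => List.mem_append_right _ hx) hcov x hr).1
            rcases List.mem_append.mp hin with h | h
            · rcases List.mem_append.mp h with h | h
              · exact absurd h hxV
              · exact List.mem_cons.mpr (Or.inl (List.mem_singleton.mp h))
            · exact List.mem_cons_of_mem _ h
        have hzN : z ∉ N := fun h => hnotV z h (List.mem_append_right _ (List.mem_singleton_self _))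
        have hndzN : (z :: N).Nodup := List.nodup_cons.mpr ⟨hzN, hndN⟩
        have hldz : pvLdr maps r c z := by
          refine ⟨hg, fun w hw hlt => ?_⟩
          have hwP : w ∈ P := hPcomp w (pvGood_mem_cells (pvConn_good_right hw)) hlt
          exact hzV ((hmem z).mpr ⟨w, hwP, pvConn_symm hw⟩)
        have hrz : pvRoot maps r c z = z := (pvRoot_self_iff hg).mpr hldz
        have hkrz : pvKeyRoot maps r c z = true := by
          simp [pvKeyRoot, pvKey_iff.mpr hg, hrz]
        have hLval : (solLoop maps r c (r.toNat * c.toNat + 1) (st.2 ++ [z]) [z] 0).2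
            = pvSum maps (z :: N) := by
          rw [heq]
          simp [pvSum, pvValZ]
        have hclassSum : pvPartSum maps r c (pvCells r c) z = pvSum maps (z :: N) := by
          have hiff : ∀ x, x ∈ (pvCells r c).filter (pvInClass maps r c z) ↔ x ∈ z :: N := by
            intro x
            rw [List.mem_filter, hcompN x]
            constructor
            · rintro ⟨hxc, hic⟩
              simp only [pvInClass, Bool.and_eq_true, decide_eq_true_eq] at hic
              have hxg : pvGood maps r c x := pvKey_iff.mp hic.1
              have hre : pvRoot maps r c x = pvRoot maps r c z := by rw [hic.2, hrz]
              exact pvConn_symm ((pvRoot_eq_iff hxg hg).mp hre)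
            · intro hc
              have hxg := pvConn_good_right hc
              refine ⟨pvGood_mem_cells hxg, ?_⟩
              simp only [pvInClass, Bool.and_eq_true, decide_eq_true_eq]
              refine ⟨pvKey_iff.mpr hxg, ?_⟩
              rw [(pvRoot_eq_iff hxg hg).mpr (pvConn_symm hc), hrz]
          have hndS : ((pvCells r c).filter (pvInClass maps r c z)).Nodup :=
            (nodup_pvCells r c).filter _
          have hperm : ((pvCells r c).filter (pvInClass maps r c z)).Perm (z :: N) :=
            (List.perm_ext_iff_of_nodup hndS hndzN).mpr hiff
          simp only [pvPartSum, pvSum]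
          exact (hperm.map _).sum_eq
        have hansApp : pvAns maps r c (P ++ [z]) = pvAns maps r c P ++
            (if pvSum maps (z :: N) ≠ 0 then [pvSum maps (z :: N)] else []) := by
          unfold pvAns
          rw [List.filter_append, List.map_append, List.filter_append]
          congr 1
          by_cases ht : pvSum maps (z :: N) = 0
          · simp [hkrz, hclassSum, ht]
          · simp [hkrz, hclassSum, ht]
        have hL1 : (solLoop maps r c (r.toNat * c.toNat + 1) (st.2 ++ [z]) [z] 0).1
            = (st.2 ++ [z]) ++ N := by rw [heq]
        have hmem' : ∀ x, x ∈ (st.2 ++ [z]) ++ N ↔ ∃ q ∈ P ++ [z], pvConn maps r c q x := by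
          intro x
          constructor
          · intro hx
            rcases List.mem_append.mp hx with hx | hx
            · rcases List.mem_append.mp hx with hx | hx
              · obtain ⟨q, hq, hc⟩ := (hmem x).mp hx
                exact ⟨q, List.mem_append_left _ hq, hc⟩
              · obtain rfl := List.mem_singleton.mp hx
                exact ⟨x, List.mem_append_right _ (List.mem_singleton_self _), pvConn_refl hg⟩
            · exact ⟨z, List.mem_append_right _ (List.mem_singleton_self _),
                (hcompN x).mp (List.mem_cons_of_mem _ hx)⟩
          · rintro ⟨q, hq, hc⟩
            rcases List.mem_append.mp hq with hq | hq
            · exact List.mem_append_left _ (List.mem_append_left _ ((hmem x).mpr ⟨q, hq, hc⟩))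
            · obtain rfl := List.mem_singleton.mp hq
              rcases List.mem_cons.mp ((hcompN x).mpr hc) with rfl | hx
              · exact List.mem_append_left _ (List.mem_append_right _ (List.mem_singleton_self _))
              · exact List.mem_append_right _ hx
        have hnd' : ((st.2 ++ [z]) ++ N).Nodup :=
          List.nodup_append'.mpr ⟨hVnd, hndN, fun a ha hb => hnotV a hb ha⟩
        by_cases ht : (solLoop maps r c (r.toNat * c.toNat + 1) (st.2 ++ [z]) [z] 0).2 = 0
        · have hstA : solCellA maps r c st z.1 z.2
              = (st.1, (solLoop maps r c (r.toNat * c.toNat + 1) (st.2 ++ [z]) [z] 0).1) := by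
            simp [solCellA, solBfs, hch, hzV, ht]
          rw [hstA, hL1]
          refine ih (P ++ [z]) (st.1, (st.2 ++ [z]) ++ N) hassoc hmem' hnd' ?_
          have hsz : pvSum maps (z :: N) = 0 := by rw [← hLval]; exact ht
          rw [hansApp, hsz]
          simpa using hans
        · have hstA : solCellA maps r c st z.1 z.2
              = (st.1 ++ [(solLoop maps r c (r.toNat * c.toNat + 1) (st.2 ++ [z]) [z] 0).2],
                 (solLoop maps r c (r.toNat * c.toNat + 1) (st.2 ++ [z]) [z] 0).1) := by
            simp [solCellA, solBfs, hch, hzV, ht]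
          rw [hstA, hL1, hLval]
          refine ih (P ++ [z]) _ hassoc hmem' hnd' ?_
          have hsz : pvSum maps (z :: N) ≠ 0 := by rw [← hLval]; exact ht
          rw [hansApp, if_pos hsz, hans]
    · -- 'X' cell: skipped by A, not a key and in no class
      have hng : ¬ pvGood maps r c z := fun hgg => hch hgg.2.2.2.2
      have hstA : solCellA maps r c st z.1 z.2 = st := by
        simp [solCellA, hch]
      rw [hstA]
      refine ih (P ++ [z]) st hassoc ?_ hnd ?_
      · intro x
        rw [hmem x]
        constructor
        · rintro ⟨q, hq, hc⟩; exact ⟨q, List.mem_append_left _ hq, hc⟩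
        · rintro ⟨q, hq, hc⟩
          rcases List.mem_append.mp hq with hq | hq
          · exact ⟨q, hq, hc⟩
          · obtain rfl := List.mem_singleton.mp hq
            exact absurd hc.1 hng
      · rw [hans]
        have hkrz : pvKeyRoot maps r c z = false := by
          have hks : ((pvPF maps r c).get? z).isSome = false := by
            rw [← Bool.not_eq_true]
            exact fun h => hng (pvKey_iff.mp h)
          simp [pvKeyRoot, hks]
        simp [pvAns, List.filter_append, hkrz]

-- ===== the accumulation loop of B ===============================================
def pvSStep (maps : List String) (r c : Int) (s : PySem.Dict (Int × Int) Int)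
    (z : Int × Int) : PySem.Dict (Int × Int) Int :=
  if ((pvPF maps r c).get? z).isSome = true then
    s.insert (pvRoot maps r c z) (s.getD (pvRoot maps r c z) 0 + pvValZ maps z)
  else s

lemma pvSInv (maps : List String) (r c : Int) :
    ∀ (Q P : List (Int × Int)) (d : PySem.Dict (Int × Int) Int),
    P ++ Q = pvCells r c →
    d.items = pvItems maps r c P →
    (Q.foldl (pvSStep maps r c) d).items = pvItems maps r c (P ++ Q) := by
  intro Q
  induction Q with
  | nil =>
    intro P d h hitems
    simpa using hitems
  | cons z Q ih =>
    intro P d hPQ hitems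
    obtain ⟨hPlt, hPcomp, hzP, hPnd⟩ := prefix_facts hPQ
    have hassoc : (P ++ [z]) ++ Q = pvCells r c := by
      rw [List.append_assoc]; exact hPQ
    rw [List.foldl_cons, show P ++ z :: Q = (P ++ [z]) ++ Q by simp]
    refine ih (P ++ [z]) (pvSStep maps r c d z) hassoc ?_
    -- the one-cell step
    have hkeys : d.keys = P.filter (pvKeyRoot maps r c) := by
      have hk : d.keys = d.items.map Prod.fst := rfl
      rw [hk, hitems]
      unfold pvItems
      rw [List.map_map]
      simp [Function.comp_def]
    have hknd : d.keys.Nodup := by rw [hkeys]; exact hPnd.filter _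
    by_cases hkey : ((pvPF maps r c).get? z).isSome = true
    · have hg : pvGood maps r c z := pvKey_iff.mp hkey
      obtain ⟨hconn, hldrt⟩ := pvRoot_spec hg
      have hgrt : pvGood maps r c (pvRoot maps r c z) := hldrt.1
      have hrtrt : pvRoot maps r c (pvRoot maps r c z) = pvRoot maps r c z :=
        (pvRoot_self_iff hgrt).mpr hldrt
      have hlert : ¬ pvLt z (pvRoot maps r c z) := pvRoot_le hg
      by_cases hrz : pvRoot maps r c z = z
      · -- a new bucket, appended at the end
        have hznk : z ∉ d.keys := by
          rw [hkeys]
          intro hzk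
          exact hzP (List.mem_filter.mp hzk).1
        have hcont : d.contains z = false := by
          rw [PySem.Dict.contains_eq_decide_mem_keys]
          simp [hznk]
        have hgd0 : d.getD z 0 = 0 := PySem.Dict.getD_of_not_contains _ _ hcont
        have hstep : pvSStep maps r c d z = d.insert z (0 + pvValZ maps z) := by
          rw [pvSStep, if_pos hkey, hrz, hgd0]
        have hemptycls : P.filter (pvInClass maps r c z) = [] := by
          rw [List.filter_eq_nil_iff]
          intro x hxP hic
          simp only [pvInClass, Bool.and_eq_true, decide_eq_true_eq] at hic
          have hxg : pvGood maps r c x := pvKey_iff.mp hic.1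
          have hcxz : pvConn maps r c x z := by
            have := (pvRoot_spec hxg).1
            rwa [hic.2] at this
          exact (hrz ▸ hldrt).2 x (pvConn_symm hcxz) (hPlt x hxP)
        have hps : ∀ m ∈ P.filter (pvKeyRoot maps r c),
            pvPartSum maps r c (P ++ [z]) m = pvPartSum maps r c P m := by
          intro m hm
          have hmP : m ∈ P := (List.mem_filter.mp hm).1
          have hmz : pvInClass maps r c m z = false := by
            have : pvRoot maps r c z ≠ m := by
              rw [hrz]; intro he; exact hzP (he ▸ hmP)
            simp [pvInClass, this]
          unfold pvPartSum
          rw [List.filter_append]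
          simp [hmz]
        have hkrz : pvKeyRoot maps r c z = true := by
          simp [pvKeyRoot, hkey, hrz]
        have hpsz : pvPartSum maps r c (P ++ [z]) z = 0 + pvValZ maps z := by
          unfold pvPartSum
          rw [List.filter_append, hemptycls]
          have : pvInClass maps r c z z = true := by
            simp [pvInClass, hkey, hrz]
          simp [this, pvValZ]
        rw [hstep, PySem.Dict.items_insert_of_not_contains _ _ hcont, hitems]
        unfold pvItems
        rw [List.filter_append]
        have hfz : List.filter (pvKeyRoot maps r c) [z] = [z] := by simp [hkrz]
        rw [hfz, List.map_append]
        congr 1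
        · exact (List.map_congr_left (fun m hm => by rw [hps m hm])).symm
        · simp [hpsz]
      · -- an existing bucket, updated in place
        have hltrtz : pvLt (pvRoot maps r c z) z := by
          rcases pvLt_total hrz with h | h
          · exact h
          · exact absurd h hlert
        have hrtP : pvRoot maps r c z ∈ P := hPcomp _ (pvGood_mem_cells hgrt) hltrtz
        have hkrrt : pvKeyRoot maps r c (pvRoot maps r c z) = true := by
          simp [pvKeyRoot, pvKey_iff.mpr hgrt, hrtrt]
        have hrtk : pvRoot maps r c z ∈ P.filter (pvKeyRoot maps r c) :=
          List.mem_filter.mpr ⟨hrtP, hkrrt⟩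
        have hmemit : (pvRoot maps r c z, pvPartSum maps r c P (pvRoot maps r c z)) ∈ d.items := by
          rw [hitems]
          exact List.mem_map_of_mem hrtk
        have hget : d.get? (pvRoot maps r c z)
            = some (pvPartSum maps r c P (pvRoot maps r c z)) :=
          PySem.Dict.get?_of_mem_items _ hmemit hknd
        have hgd : d.getD (pvRoot maps r c z) 0 = pvPartSum maps r c P (pvRoot maps r c z) :=
          PySem.Dict.getD_of_get?_eq_some _ _ hget
        have hcont : d.contains (pvRoot maps r c z) = true := by
          rw [PySem.Dict.contains_eq_isSome_get?, hget]
          rfl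
        have hstep : pvSStep maps r c d z = d.insert (pvRoot maps r c z)
            (pvPartSum maps r c P (pvRoot maps r c z) + pvValZ maps z) := by
          rw [pvSStep, if_pos hkey, hgd]
        have hkrz : pvKeyRoot maps r c z = false := by
          simp [pvKeyRoot, hrz]
        have hps : ∀ m, pvPartSum maps r c (P ++ [z]) m = pvPartSum maps r c P m
            + (if m = pvRoot maps r c z then pvValZ maps z else 0) := by
          intro m
          unfold pvPartSum
          rw [List.filter_append]
          by_cases hm : m = pvRoot maps r c z
          · subst hm
            have : pvInClass maps r c (pvRoot maps r c z) z = true := by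
              simp [pvInClass, hkey]
            simp [this, pvValZ]
          · have : pvInClass maps r c m z = false := by
              have hne : pvRoot maps r c z ≠ m := fun he => hm he.symm
              simp [pvInClass, hne]
            simp [this, hm]
        rw [hstep, PySem.Dict.items_insert_of_contains _ _ hcont, hitems]
        unfold pvItems
        rw [List.filter_append]
        have hfz : List.filter (pvKeyRoot maps r c) [z] = [] := by simp [hkrz]
        rw [hfz, List.append_nil, List.map_map]
        refine List.map_congr_left ?_
        intro m hm
        simp only [Function.comp_apply, beq_iff_eq]
        by_cases hme : m = pvRoot maps r c z
        · subst hme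
          rw [if_pos rfl, hps _, if_pos rfl]
        · rw [if_neg hme, hps m, if_neg hme, add_zero]
    · -- not a key ⇒ not a good cell: nothing happens
      have hstep : pvSStep maps r c d z = d := by
        rw [pvSStep, if_neg hkey]
      have hkf : ((pvPF maps r c).get? z).isSome = false := by
        rw [← Bool.not_eq_true]; exact hkey
      have hkrz : pvKeyRoot maps r c z = false := by
        simp [pvKeyRoot, hkf]
      have hic : ∀ m, pvInClass maps r c m z = false := by
        intro m; simp [pvInClass, hkf]
      rw [hstep, hitems]
      unfold pvItems
      rw [List.filter_append]
      have hfz : List.filter (pvKeyRoot maps r c) [z] = [] := by simp [hkrz]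
      rw [hfz, List.append_nil]
      refine List.map_congr_left ?_
      intro m hm
      unfold pvPartSum
      rw [List.filter_append]
      simp [hic]

-- ===== assembling the two programs ==============================================
lemma foldl_pvCells' {σ : Type} (r c : Int) (g : σ → Int → Int → σ) (init : σ) :
    (PySem.List.pyRange 0 r 1).foldl (fun s i =>
      (PySem.List.pyRange 0 c 1).foldl (fun s j => g s i j) s) init
    = (pvCells r c).foldl (fun s z => g s z.1 z.2) init :=
  foldl_pvCells r c (fun s z => g s z.1 z.2) init

lemma pvPF_def (maps : List String) (r c : Int) :
    (pvCells r c).foldl (fun p z => altUnionCell (r.toNat * c.toNat + 1) p (z.1, z.2))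
      ((pvCells r c).foldl (fun d z =>
        if pvCharAt maps z.1 z.2 ≠ some 'X' then d.insert (z.1, z.2) (z.1, z.2) else d)
        PySem.Dict.empty)
    = pvPF maps r c := rfl

lemma pvSStep_eta (maps : List String) (r c : Int) :
    (fun (s : PySem.Dict (Int × Int) Int) (z : Int × Int) =>
      if ((pvPF maps r c).get? (z.1, z.2)).isSome = true then
        s.insert (altFind (pvPF maps r c) (r.toNat * c.toNat + 1) (z.1, z.2))
          (s.getD (altFind (pvPF maps r c) (r.toNat * c.toNat + 1) (z.1, z.2)) 0
            + pvVal maps z.1 z.2)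
      else s) = pvSStep maps r c := rfl

lemma pvValues_items {κ ν : Type} [BEq κ] (d : PySem.Dict κ ν) :
    d.values = d.items.map Prod.snd := rfl

lemma pvAns_items (maps : List String) (r c : Int) :
    ((pvItems maps r c (pvCells r c)).map Prod.snd).filter (fun v => decide (v ≠ 0))
    = pvAns maps r c (pvCells r c) := by
  unfold pvItems pvAns
  rw [List.map_map]
  rfl

lemma pvFinal (L : List Int) :
    (if L ≠ [] then PySem.List.sorted L (fun t => t) false else [-1]) =
    (if PySem.List.sorted L (fun t => t) false ≠ [] then PySem.List.sorted L (fun t => t) false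
     else [-1]) := by
  by_cases h : L = []
  · subst h
    simp [PySem.List.sorted_eq_nil_iff]
  · have hs : PySem.List.sorted L (fun t => t) false ≠ [] := by
      rw [Ne, PySem.List.sorted_eq_nil_iff]
      exact h
    rw [if_pos h, if_pos hs]

-- ===== VERDICT (by name: the statement is the Claim_ definition above) =====
theorem solution_spec : Claim_equal_solution := by
  intro maps _ hpre
  unfold Spec_solution solution solution_alt
  obtain ⟨hne, -⟩ := hpre
  cases maps with
  | nil => exact absurd rfl hne
  | cons m ms =>
    rw [PySem.List.pyGet?_zero_cons m ms]
    dsimp only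
    simp only [foldl_pvCells']
    rw [pvPF_def (m :: ms) ((m :: ms).length : Int) (PySem.Str.len m)]
    rw [pvSStep_eta (m :: ms) ((m :: ms).length : Int) (PySem.Str.len m)]
    have hS := pvSInv (m :: ms) ((m :: ms).length : Int) (PySem.Str.len m)
      (pvCells ((m :: ms).length : Int) (PySem.Str.len m)) [] PySem.Dict.empty
      (by simp) (by rfl)
    simp only [List.nil_append] at hS
    rw [pvValues_items, hS, pvAns_items]
    have hA := pvAInv (m :: ms) ((m :: ms).length : Int) (PySem.Str.len m)
      (pvCells ((m :: ms).length : Int) (PySem.Str.len m)) [] ([], [])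
      (by simp) (by simp) (by simp) (by rfl)
    simp only [List.nil_append] at hA
    rw [hA]
    exact pvFinal _
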